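-- pv_equiv track=rewrite | github.com/xkunD/datascience-cw | other-files/codedraft.py | find_most_contacted
-- ===== SOURCE A (Python) =====
-- def find_most_contacted(contacts_dic):
--     contact_count = {}
--     for contact_list in contacts_dic.values():
--         for contact in contact_list:
--             if contact in contact_count:
--                 contact_count[contact] += 1
--             else:
--                 contact_count[contact] = 1
--
--     # Find the contacts with the highest count
--     max_count = max(contact_count.values())
--     most_contacted = [contact for contact, count in contact_count.items() if count == max_count]
--     most_contacted.sort()
--     return most_contacted
-- ===== SOURCE B (Python) =====
-- def find_most_contacted(contacts_dic):
--     # Sort-then-scan: flatten all contact lists, sort once, then walk the runs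
--     # of equal values keeping the longest-run contacts (already in sorted order).
--     flat = sorted(c for lst in contacts_dic.values() for c in lst)
--     best, best_len = [], 0
--     i, n = 0, len(flat)
--     while i < n:
--         j = i
--         while j < n and flat[j] == flat[i]:
--             j += 1
--         run = j - i
--         if run > best_len:
--             best, best_len = [flat[i]], run
--         elif run == best_len:
--             best.append(flat[i])
--         i = j
--     return best
-- ===== Notes on version B (the rewrite author's own statement) =====
-- stated objective: alternative
-- what changed: Replaces the hash-count / max-scan / filter / final-sort pipeline by flatten, one global sort, then a single run-length scan over the sorted list that keeps the contacts with the longest runs (output emerges already sorted, no dict and no final sort).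
-- outside the precondition, e.g. on find_most_contacted({}): A raises ValueError, B returns []; on find_most_contacted({'a': []}): A raises ValueError, B returns []
-- crash fix: When all contact lists are empty (no contact at all) A raises ValueError from max() on an empty sequence; B naturally returns []. — e.g. on find_most_contacted([("alice", [])]): A raises ValueError, B returns []
import Mathlib
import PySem

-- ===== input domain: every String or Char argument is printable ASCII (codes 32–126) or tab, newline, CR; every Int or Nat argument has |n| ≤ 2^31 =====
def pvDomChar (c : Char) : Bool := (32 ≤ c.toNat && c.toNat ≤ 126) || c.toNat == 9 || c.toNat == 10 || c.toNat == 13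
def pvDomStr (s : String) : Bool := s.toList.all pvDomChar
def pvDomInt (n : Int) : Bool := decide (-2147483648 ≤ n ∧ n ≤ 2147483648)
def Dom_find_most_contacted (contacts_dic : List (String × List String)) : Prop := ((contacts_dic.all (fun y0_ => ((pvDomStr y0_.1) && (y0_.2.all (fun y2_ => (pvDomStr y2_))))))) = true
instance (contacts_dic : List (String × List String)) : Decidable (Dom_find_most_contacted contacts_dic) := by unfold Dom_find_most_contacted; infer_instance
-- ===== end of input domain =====

-- B replaces A's hash-count / max / filter / sort pipeline by one global sort plus a
-- run-length scan whose output is already sorted (objective: alternative algorithm).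

-- ===== PORT A =====
def find_most_contacted (contacts_dic : List (String × List String)) : List String :=
  let contact_count : PySem.Dict String Int :=
    contacts_dic.foldl (fun d p =>
      p.2.foldl (fun d contact =>
        if d.contains contact then d.insert contact (d.getD contact 0 + 1)
        else d.insert contact 1) d) PySem.Dict.empty
  match PySem.List.max? contact_count.values id with
  | none => []   -- Python raises ValueError here (max() of empty); excluded by Pre_
  | some max_count =>
    PySem.List.sorted ((contact_count.items.filter (fun p => p.2 == max_count)).map (·.1)) id

-- ===== PORT B =====
-- the outer while-loop of Source B: each step consumes one run of equal values
-- fuel = remaining length; the while-loop consumes at least one element per iteration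
def pvScan : Nat → List String → List String → Nat → List String
  | 0, _, best, _ => best
  | _ + 1, [], best, _ => best
  | fuel + 1, x :: rest, best, best_len =>
    let run := ((x :: rest).takeWhile (· == x)).length
    let rest' := (x :: rest).dropWhile (· == x)
    if run > best_len then pvScan fuel rest' [x] run
    else if run = best_len then pvScan fuel rest' (best ++ [x]) best_len
    else pvScan fuel rest' best best_len

def find_most_contacted_alt (contacts_dic : List (String × List String)) : List String :=
  let flat := PySem.List.sorted (contacts_dic.flatMap (fun p => p.2)) id
  pvScan flat.length flat [] 0

-- ===== PRECONDITION & SPEC =====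
-- Pre_ excludes inputs with no contact at all: A's max() raises ValueError there.
def Pre_find_most_contacted (contacts_dic : List (String × List String)) : Prop :=
  contacts_dic.flatMap (fun p => p.2) ≠ []
instance (contacts_dic : List (String × List String)) : Decidable (Pre_find_most_contacted contacts_dic) := by unfold Pre_find_most_contacted; infer_instance
def pvWitness_find_most_contacted : (List (String × List String)) := [("alice", ["bob", "carol", "bob"])]

-- A raises ValueError (max() of an empty sequence) when every contact list is empty; B returns [].
def Raises_find_most_contacted (contacts_dic : List (String × List String)) : Prop :=
  contacts_dic.flatMap (fun p => p.2) = []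
instance (contacts_dic : List (String × List String)) : Decidable (Raises_find_most_contacted contacts_dic) := by unfold Raises_find_most_contacted; infer_instance
def pvRaiseWitness_find_most_contacted : (List (String × List String)) := [("alice", [])]
def pvRaiseWitnessOut_find_most_contacted : List String := []

def Spec_find_most_contacted (contacts_dic : List (String × List String)) (out : List String) : Prop := out = find_most_contacted_alt contacts_dic
instance (contacts_dic : List (String × List String)) (out : List String) : Decidable (Spec_find_most_contacted contacts_dic out) := by unfold Spec_find_most_contacted; infer_instance

-- ===== CLAIM (what is proved, stated in full; the proofs are below) =====
def Claim_equal_find_most_contacted : Prop := ∀ (contacts_dic : List (String × List String)), Dom_find_most_contacted contacts_dic → Pre_find_most_contacted contacts_dic → Spec_find_most_contacted contacts_dic (find_most_contacted contacts_dic)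
def Claim_raises_find_most_contacted : Prop := (∀ (contacts_dic : List (String × List String)), Dom_find_most_contacted contacts_dic → Raises_find_most_contacted contacts_dic → ¬ Pre_find_most_contacted contacts_dic) ∧ (Dom_find_most_contacted (pvRaiseWitness_find_most_contacted) ∧ Raises_find_most_contacted (pvRaiseWitness_find_most_contacted) ∧ find_most_contacted_alt (pvRaiseWitness_find_most_contacted) = pvRaiseWitnessOut_find_most_contacted)

-- ===== LEMMAS AND PROOFS =====



-- proof-side reference functions for the run scan
def pvMaxRun : List String → Nat
  | [] => 0
  | x :: rest => max ((x :: rest).takeWhile (· == x)).length (pvMaxRun ((x :: rest).dropWhile (· == x)))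
termination_by l => l.length
decreasing_by
  rw [List.dropWhile_cons_of_pos (by simp)]
  exact Nat.lt_succ_of_le (Nat.le_trans (List.length_dropWhile_le _ rest) (Nat.le_refl _))

def pvHeads : List String → List String
  | [] => []
  | x :: rest => x :: pvHeads ((x :: rest).dropWhile (· == x))
termination_by l => l.length
decreasing_by
  rw [List.dropWhile_cons_of_pos (by simp)]
  exact Nat.lt_succ_of_le (Nat.le_trans (List.length_dropWhile_le _ rest) (Nat.le_refl _))


lemma pv_dropWhile_lt (x : String) (rest : List String)
    (hs : (x :: rest).Pairwise (· ≤ ·)) :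
    ∀ y ∈ (x :: rest).dropWhile (· == x), x < y := by
  rw [List.dropWhile_cons_of_pos (by simp)]
  induction rest with
  | nil => simp
  | cons z rest' ih =>
    rcases List.pairwise_cons.1 hs with ⟨hx, hzr⟩
    by_cases hz : (z == x) = true
    · rw [List.dropWhile_cons_of_pos (p := (· == x)) hz]
      apply ih
      exact List.pairwise_cons.2 ⟨fun y hy => hx y (List.mem_cons_of_mem _ hy), (List.pairwise_cons.1 hzr).2⟩
    · rw [List.dropWhile_cons_of_neg (p := (· == x)) hz]
      intro y hy
      have hxz : x < z := lt_of_le_of_ne (hx _ (by simp)) (fun h => hz (by simp [h.symm]))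
      rcases List.mem_cons.1 hy with rfl | hy'
      · exact hxz
      · exact lt_of_lt_of_le hxz ((List.pairwise_cons.1 hzr).1 y hy')

lemma pv_count_head (x : String) (rest : List String)
    (hs : (x :: rest).Pairwise (· ≤ ·)) :
    (x :: rest).count x = ((x :: rest).takeWhile (· == x)).length := by
  have hdec := List.takeWhile_append_dropWhile (p := (· == x)) (l := x :: rest)
  have h1 : ((x :: rest).takeWhile (· == x)).count x = ((x :: rest).takeWhile (· == x)).length :=
    List.count_eq_length.2 (fun b hb => (beq_iff_eq.mp (List.mem_takeWhile_imp (p := (· == x)) hb)).symm)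
  have h2 : ((x :: rest).dropWhile (· == x)).count x = 0 :=
    List.count_eq_zero.2 (fun hmem => lt_irrefl x (pv_dropWhile_lt x rest hs x hmem))
  calc (x :: rest).count x = (((x :: rest).takeWhile (· == x)) ++ ((x :: rest).dropWhile (· == x))).count x := by rw [hdec]
    _ = _ := by rw [List.count_append, h1, h2]; omega

lemma pv_count_tail (x : String) (rest : List String) (y : String) (hy : y ≠ x) :
    (x :: rest).count y = ((x :: rest).dropWhile (· == x)).count y := by
  have hdec := List.takeWhile_append_dropWhile (p := (· == x)) (l := x :: rest)
  have h1 : ((x :: rest).takeWhile (· == x)).count y = 0 :=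
    List.count_eq_zero.2 (fun hmem => hy (beq_iff_eq.mp (List.mem_takeWhile_imp (p := (· == x)) hmem)))
  calc (x :: rest).count y = (((x :: rest).takeWhile (· == x)) ++ ((x :: rest).dropWhile (· == x))).count y := by rw [hdec]
    _ = _ := by rw [List.count_append, h1, Nat.zero_add]

lemma pv_mem_heads (l : List String) (y : String) : y ∈ pvHeads l ↔ y ∈ l := by
  induction l using pvHeads.induct with
  | case1 => simp [pvHeads]
  | case2 x rest ih =>
    rw [pvHeads]
    constructor
    · intro h
      rcases List.mem_cons.1 h with rfl | h'
      · simp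
      · have := ih.1 h'
        have hsub : ((x :: rest).dropWhile (· == x)) <:+ (x :: rest) := List.dropWhile_suffix _
        exact hsub.subset this
    · intro h
      rcases List.mem_cons.1 h with rfl | h'
      · simp
      · by_cases hyx : y = x
        · subst hyx; simp
        · have : y ∈ (x :: rest).dropWhile (· == x) := by
            have hdec := List.takeWhile_append_dropWhile (p := (· == x)) (l := x :: rest)
            have : y ∈ ((x :: rest).takeWhile (· == x)) ++ ((x :: rest).dropWhile (· == x)) := by
              rw [hdec]; exact h
            rcases List.mem_append.1 this with ht | hd
            · exact absurd (beq_iff_eq.mp (List.mem_takeWhile_imp (p := (· == x)) ht)) hyx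
            · exact hd
          exact List.mem_cons_of_mem _ (ih.2 this)
lemma pv_pairwise_dropWhile (x : String) (rest : List String) (hs : (x :: rest).Pairwise (· ≤ ·)) :
    ((x :: rest).dropWhile (· == x)).Pairwise (· ≤ ·) :=
  List.Pairwise.sublist ((List.dropWhile_suffix _).sublist) hs

lemma pv_heads_sorted_lt (l : List String) (hs : l.Pairwise (· ≤ ·)) :
    (pvHeads l).Pairwise (· < ·) := by
  induction l using pvHeads.induct with
  | case1 => simp [pvHeads]
  | case2 x rest ih =>
    rw [pvHeads]
    refine List.pairwise_cons.2 ⟨?_, ih (pv_pairwise_dropWhile x rest hs)⟩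
    intro y hy
    exact pv_dropWhile_lt x rest hs y ((pv_mem_heads _ y).1 hy)

lemma pv_maxRun_bound (l : List String) (hs : l.Pairwise (· ≤ ·)) :
    ∀ y ∈ l, l.count y ≤ pvMaxRun l := by
  induction l using pvMaxRun.induct with
  | case1 => simp
  | case2 x rest ih =>
    intro y hy
    rw [pvMaxRun]
    by_cases hyx : y = x
    · subst hyx
      rw [pv_count_head y rest hs]
      exact le_max_left _ _
    · rw [pv_count_tail x rest y hyx]
      by_cases hmem : y ∈ (x :: rest).dropWhile (· == x)
      · exact le_trans (ih (pv_pairwise_dropWhile x rest hs) y hmem) (le_max_right _ _)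
      · rw [List.count_eq_zero.2 hmem]; exact Nat.zero_le _
    
lemma pv_maxRun_attained (l : List String) (hs : l.Pairwise (· ≤ ·)) (hne : l ≠ []) :
    ∃ y ∈ l, l.count y = pvMaxRun l := by
  induction l using pvMaxRun.induct with
  | case1 => exact absurd rfl hne
  | case2 x rest ih =>
    rw [pvMaxRun]
    by_cases hd : (x :: rest).dropWhile (· == x) = []
    · refine ⟨x, by simp, ?_⟩
      rw [pv_count_head x rest hs, hd]
      simp [pvMaxRun]
    · rcases ih (pv_pairwise_dropWhile x rest hs) hd with ⟨y, hy, hcy⟩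
      have hyx : y ≠ x := ne_of_gt (pv_dropWhile_lt x rest hs y hy)
      by_cases hcmp : pvMaxRun ((x :: rest).dropWhile (· == x)) ≤ ((x :: rest).takeWhile (· == x)).length
      · refine ⟨x, by simp, ?_⟩
        rw [pv_count_head x rest hs]
        omega
      · refine ⟨y, ?_, ?_⟩
        · exact ((List.dropWhile_suffix _).subset) hy
        · rw [pv_count_tail x rest y hyx, hcy]
          omega
lemma pvScan_spec : ∀ (fuel : Nat) (l : List String), l.length ≤ fuel → l.Pairwise (· ≤ ·) →
    ∀ (best : List String) (bl : Nat),
    pvScan fuel l best bl =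
      (if max bl (pvMaxRun l) = bl then best else []) ++
        (pvHeads l).filter (fun y => l.count y = max bl (pvMaxRun l)) := by
  intro fuel
  induction fuel with
  | zero =>
    intro l hf _ best bl
    have : l = [] := List.eq_nil_of_length_eq_zero (Nat.le_zero.1 hf)
    subst this
    simp [pvScan, pvHeads, pvMaxRun]
  | succ fuel ih =>
    intro l hf hs best bl
    match l with
    | [] => simp [pvScan, pvHeads, pvMaxRun]
    | x :: rest =>
      have hdw : (x :: rest).dropWhile (· == x) = rest.dropWhile (· == x) :=
        List.dropWhile_cons_of_pos (by simp)
      have hlen : ((x :: rest).dropWhile (· == x)).length ≤ fuel := by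
        rw [hdw]
        exact le_trans (List.length_dropWhile_le _ rest) (Nat.le_of_succ_le_succ hf)
      have hs' : ((x :: rest).dropWhile (· == x)).Pairwise (· ≤ ·) := pv_pairwise_dropWhile x rest hs
      have hcx : (x :: rest).count x = ((x :: rest).takeWhile (· == x)).length := pv_count_head x rest hs
      have hMR : pvMaxRun (x :: rest) = max ((x :: rest).takeWhile (· == x)).length (pvMaxRun ((x :: rest).dropWhile (· == x))) := by
        rw [pvMaxRun]
      have hH : pvHeads (x :: rest) = x :: pvHeads ((x :: rest).dropWhile (· == x)) := by
        rw [pvHeads]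
      have hfiltc : ∀ (m : Nat),
          (pvHeads ((x :: rest).dropWhile (· == x))).filter (fun y => (x :: rest).count y = m) =
          (pvHeads ((x :: rest).dropWhile (· == x))).filter (fun y => ((x :: rest).dropWhile (· == x)).count y = m) := by
        intro m
        apply List.filter_congr
        intro y hy
        have hy' : y ∈ (x :: rest).dropWhile (· == x) := (pv_mem_heads _ y).1 hy
        have hyx : y ≠ x := ne_of_gt (pv_dropWhile_lt x rest hs y hy')
        rw [pv_count_tail x rest y hyx]
      have hIH : ∀ (b : List String) (n : Nat),
          pvScan fuel ((x :: rest).dropWhile (· == x)) b n =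
            (if max n (pvMaxRun ((x :: rest).dropWhile (· == x))) = n then b else []) ++
              (pvHeads ((x :: rest).dropWhile (· == x))).filter
                (fun y => ((x :: rest).dropWhile (· == x)).count y = max n (pvMaxRun ((x :: rest).dropWhile (· == x)))) :=
        fun b n => ih _ hlen hs' b n
      rw [pvScan]
      simp only [hMR, hH, List.filter_cons, hcx, hfiltc, hIH]
      generalize pvMaxRun ((x :: rest).dropWhile (· == x)) = M
      generalize hr : ((x :: rest).takeWhile (· == x)).length = r
      rcases Nat.lt_trichotomy bl r with h1 | h2 | h3
      · rw [if_pos (show r > bl by omega)]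
        have hm1 : max bl (max r M) = max r M := by omega
        rw [hm1, if_neg (show ¬ max r M = bl by omega)]
        by_cases hc : max r M = r
        · rw [if_pos hc, if_pos (show decide (r = max r M) = true by simpa using hc.symm), hc]
          simp
        · rw [if_neg hc, if_neg (show ¬ (decide (r = max r M) = true) by simp; omega)]
      · rw [if_neg (by omega), if_pos h2.symm, ← h2]
        have hm1 : max bl (max bl M) = max bl M := by omega
        rw [hm1]
        by_cases hc : max bl M = bl
        · rw [if_pos hc, if_pos hc, if_pos (show decide (bl = max bl M) = true by simpa using hc.symm)]
          simp
        · rw [if_neg hc, if_neg hc, if_neg (show ¬ (decide (bl = max bl M) = true) by simp; omega)]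
      · rw [if_neg (by omega), if_neg (by omega)]
        have hm1 : max bl (max r M) = max bl M := by omega
        rw [hm1, if_neg (show ¬ (decide (r = max bl M) = true) by simp; omega)]


lemma pv_max?_cons_some : ∀ (xs : List Int) (a : Int), ∃ m, PySem.List.max? (a :: xs) id = some m := by
  intro xs
  induction xs with
  | nil => exact fun a => ⟨a, by simp [PySem.List.max?]⟩
  | cons b xs ih =>
    intro a
    have hstep : PySem.List.max? (a :: b :: xs) id =
        PySem.List.max? ((if id a < id b then b else a) :: xs) id := by
      simp only [PySem.List.max?, List.foldl_cons, apply_ite (f := some)]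
    rw [hstep]
    exact ih _

lemma pv_max?_some (xs : List Int) (h : xs ≠ []) : ∃ m, PySem.List.max? xs id = some m := by
  match xs with
  | [] => exact absurd rfl h
  | a :: rest => exact pv_max?_cons_some rest a

-- ===== VERDICT =====

theorem find_most_contacted_spec : Claim_equal_find_most_contacted := by
  intro contacts_dic _ hpre
  show find_most_contacted contacts_dic = find_most_contacted_alt contacts_dic
  have hpre' : contacts_dic.flatMap (fun p => p.2) ≠ [] := hpre
  -- A's dict is the counter of the flattened contact list
  have hstepeq : (fun (d : PySem.Dict String Int) contact =>
      if d.contains contact then d.insert contact (d.getD contact 0 + 1) else d.insert contact 1)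
      = fun d x => d.insert x (d.getD x 0 + 1) := by
    funext d c
    by_cases hc : d.contains c = true
    · rw [if_pos hc]
    · rw [if_neg hc, PySem.Dict.getD_of_not_contains d 0 (by simpa using hc)]
      norm_num
  have hdict : contacts_dic.foldl (fun d p =>
      p.2.foldl (fun d contact =>
        if d.contains contact then d.insert contact (d.getD contact 0 + 1)
        else d.insert contact 1) d) PySem.Dict.empty
      = PySem.Dict.counter (contacts_dic.flatMap (fun p => p.2)) := by
    rw [hstepeq, ← List.foldl_flatMap, PySem.Dict.foldl_insert_getD_add_one_eq_counter]
  have hvals : (PySem.Dict.counter (contacts_dic.flatMap (fun p => p.2))).values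
      = (PySem.Set.ofList (contacts_dic.flatMap (fun p => p.2))).map
          (fun k => ((((contacts_dic.flatMap (fun p => p.2)).count k) : Int))) := by
    simp [PySem.Dict.values, PySem.Dict.items_counter, List.map_map, Function.comp]
  have hitems : (PySem.Dict.counter (contacts_dic.flatMap (fun p => p.2))).items
      = (PySem.Set.ofList (contacts_dic.flatMap (fun p => p.2))).map
          (fun k => (k, (((contacts_dic.flatMap (fun p => p.2)).count k) : Int))) :=
    PySem.Dict.items_counter _
  obtain ⟨x0, hx0⟩ := List.exists_mem_of_ne_nil _ hpre'
  have hS_ne : (PySem.Set.ofList (contacts_dic.flatMap (fun p => p.2))).map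
          (fun k => ((((contacts_dic.flatMap (fun p => p.2)).count k) : Int))) ≠ [] := by
    intro heq
    have hx0' : x0 ∈ PySem.Set.ofList (contacts_dic.flatMap (fun p => p.2)) :=
      (PySem.Set.mem_ofList _ x0).2 hx0
    have : ((((contacts_dic.flatMap (fun p => p.2)).count x0) : Int)) ∈
        (PySem.Set.ofList (contacts_dic.flatMap (fun p => p.2))).map
          (fun k => ((((contacts_dic.flatMap (fun p => p.2)).count k) : Int))) :=
      List.mem_map_of_mem hx0'
    rw [heq] at this
    simp at this
  obtain ⟨m, hm⟩ := pv_max?_some _ (hvals ▸ hS_ne)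
  -- B's sorted flat list
  have hperm : (PySem.List.sorted (contacts_dic.flatMap (fun p => p.2)) id).Perm
      (contacts_dic.flatMap (fun p => p.2)) := PySem.List.sorted_perm _ id false
  have hsorted : (PySem.List.sorted (contacts_dic.flatMap (fun p => p.2)) id).Pairwise (· ≤ ·) :=
    PySem.List.sorted_pairwise _ id
  have hflat_ne : PySem.List.sorted (contacts_dic.flatMap (fun p => p.2)) id ≠ [] := by
    intro h
    rw [h] at hperm
    exact hpre' (hperm.nil_eq).symm
  -- the max count equals the longest run of the sorted list
  have hmmr : m = ((pvMaxRun (PySem.List.sorted (contacts_dic.flatMap (fun p => p.2)) id)) : Int) := by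
    have hmem := PySem.List.max?_mem hm
    have hbound := PySem.List.max?_isMax hm
    rw [hvals] at hmem hbound
    obtain ⟨k, hk, hkm⟩ := List.mem_map.1 hmem
    have hkflat : k ∈ PySem.List.sorted (contacts_dic.flatMap (fun p => p.2)) id :=
      hperm.mem_iff.2 ((PySem.Set.mem_ofList _ k).1 hk)
    have h1 : (contacts_dic.flatMap (fun p => p.2)).count k
        ≤ pvMaxRun (PySem.List.sorted (contacts_dic.flatMap (fun p => p.2)) id) := by
      rw [← hperm.count_eq k]
      exact pv_maxRun_bound _ hsorted k hkflat
    obtain ⟨y0, hy0, hy0c⟩ := pv_maxRun_attained _ hsorted hflat_ne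
    have hy0' : ((((contacts_dic.flatMap (fun p => p.2)).count y0) : Int)) ∈
        (PySem.Set.ofList (contacts_dic.flatMap (fun p => p.2))).map
          (fun k => ((((contacts_dic.flatMap (fun p => p.2)).count k) : Int))) :=
      List.mem_map_of_mem ((PySem.Set.mem_ofList _ y0).2 (hperm.mem_iff.1 hy0))
    have h2 := hbound _ hy0'
    rw [hperm.count_eq y0] at hy0c
    simp only [id_eq] at h2
    omega
  -- evaluate both ports
  rw [find_most_contacted, find_most_contacted_alt]
  simp only [hdict]
  rw [hm]
  simp only [hitems]
  rw [pvScan_spec _ _ le_rfl hsorted]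
  rw [List.filter_map]
  have hcomp : ((fun p : String × Int => p.2 == m) ∘
      (fun k => (k, ((((contacts_dic.flatMap (fun p => p.2)).count k) : Int)))))
      = fun k => ((((contacts_dic.flatMap (fun p => p.2)).count k) : Int)) == m := rfl
  rw [hcomp, List.map_map]
  have hmapid : ((fun p : String × Int => p.1) ∘ (fun k => (k, ((((contacts_dic.flatMap (fun p => p.2)).count k) : Int)))))
      = fun k : String => k := rfl
  rw [hmapid, List.map_id']
  -- B's side simplification
  rw [ite_self, List.nil_append, Nat.zero_max]
  -- final: both are the same strictly increasing list
  apply PySem.List.sorted_eq_of_perm_of_pairwise_lt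
  · -- permutation
    have hnd1 : (List.filter
        (fun y => decide ((PySem.List.sorted (contacts_dic.flatMap (fun p => p.2)) id).count y
          = pvMaxRun (PySem.List.sorted (contacts_dic.flatMap (fun p => p.2)) id)))
        (pvHeads (PySem.List.sorted (contacts_dic.flatMap (fun p => p.2)) id))).Nodup :=
      List.Pairwise.imp ne_of_lt (List.Pairwise.filter _ (pv_heads_sorted_lt _ hsorted))
    have hnd2 : (List.filter
        (fun k => ((((contacts_dic.flatMap (fun p => p.2)).count k) : Int)) == m)
        (PySem.Set.ofList (contacts_dic.flatMap (fun p => p.2)))).Nodup :=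
      List.Nodup.filter _ (PySem.Set.nodup_ofList _)
    rw [List.perm_ext_iff_of_nodup hnd1 hnd2]
    intro y
    simp only [List.mem_filter, decide_eq_true_eq, beq_iff_eq]
    rw [pv_mem_heads, PySem.Set.mem_ofList, hperm.mem_iff, hperm.count_eq y, hmmr]
    constructor
    · rintro ⟨hy, hc⟩
      exact ⟨hy, by omega⟩
    · rintro ⟨hy, hc⟩
      exact ⟨hy, by omega⟩
  · exact List.Pairwise.filter _ (pv_heads_sorted_lt _ hsorted)

theorem find_most_contacted_raises : Claim_raises_find_most_contacted := by
  unfold Claim_raises_find_most_contacted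
  constructor
  · intro c _ hr hp; exact hp hr
  · refine ⟨by decide, by decide, by decide⟩

-- self-check: the stated raise witness is inside Raises_ and B's port returns the stated value there
theorem pvRaiseWitness_find_most_contacted_ok :
    Raises_find_most_contacted pvRaiseWitness_find_most_contacted ∧
    find_most_contacted_alt pvRaiseWitness_find_most_contacted = pvRaiseWitnessOut_find_most_contacted := by
  have h := find_most_contacted_raises
  unfold Claim_raises_find_most_contacted at h
  exact ⟨h.2.2.1, h.2.2.2⟩
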